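-- pv_equiv track=rewrite | github.com/MxPerrot/BigBookSociety | scripts/recommendation_scripts/tests.py | vector_genre_item
-- ===== SOURCE A (Python) =====
-- def vector_genre_item(lvr,dico_genre):
--     vector = []
--     for genre in dico_genre:
--         if genre in lvr:
--             vector.append(1)
--         else:
--             vector.append(0)
--     return vector
-- ===== SOURCE B (Python) =====
-- def vector_genre_item(lvr, dico_genre):
--     # Invert the loops: index each genre's position(s) once, then scan lvr.
--     idx = {}
--     for i, genre in enumerate(dico_genre):
--         idx.setdefault(genre, []).append(i)
--     vector = [0] * len(dico_genre)
--     for item in lvr: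
--         for i in idx.get(item, []):
--             vector[i] = 1
--     return vector
-- ===== Notes on version B (the rewrite author's own statement) =====
-- stated objective: faster
-- what changed: Instead of scanning lvr once per genre (membership test per dict key), B builds a genre-to-positions index in one pass over the dict, allocates a zero vector, and scans lvr once, marking the indexed positions.
import Mathlib
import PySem

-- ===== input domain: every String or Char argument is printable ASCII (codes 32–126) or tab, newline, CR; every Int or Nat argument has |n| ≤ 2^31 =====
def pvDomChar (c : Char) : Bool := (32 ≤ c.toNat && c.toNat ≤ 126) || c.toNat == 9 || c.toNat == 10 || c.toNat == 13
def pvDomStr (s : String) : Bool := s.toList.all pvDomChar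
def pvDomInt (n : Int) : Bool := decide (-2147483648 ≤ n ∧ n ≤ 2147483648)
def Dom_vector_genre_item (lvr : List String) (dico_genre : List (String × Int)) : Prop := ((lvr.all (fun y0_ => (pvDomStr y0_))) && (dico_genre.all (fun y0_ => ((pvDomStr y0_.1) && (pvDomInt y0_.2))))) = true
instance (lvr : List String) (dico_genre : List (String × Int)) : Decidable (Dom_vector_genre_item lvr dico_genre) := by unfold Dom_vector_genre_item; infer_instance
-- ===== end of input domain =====

-- B inverts the loops: it builds a genre→positions index once, fills a zero vector,
-- and scans lvr marking positions — instead of testing membership in lvr per genre.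


-- ===== PORT A =====
-- 'for genre in dico_genre' iterates the dict's keys; 'genre in lvr' appends 1 or 0.
def vector_genre_item (lvr : List String) (dico_genre : List (String × Int)) : List Int :=
  dico_genre.foldl (fun vector p => if lvr.contains p.1 then vector ++ [1] else vector ++ [0]) []

-- ===== PORT B =====
-- idx = {}; for i, genre in enumerate(dico_genre): idx.setdefault(genre, []).append(i)
-- vector = [0]*len(dico_genre); for item in lvr: for i in idx.get(item, []): vector[i] = 1
def vector_genre_item_alt (lvr : List String) (dico_genre : List (String × Int)) : List Int :=
  let idx : PySem.Dict String (List Int) :=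
    (PySem.List.enumerate (dico_genre.map Prod.fst)).foldl
      (fun d p => d.modify p.2 [] (· ++ [p.1])) PySem.Dict.empty
  let vector : List Int := List.replicate dico_genre.length 0
  lvr.foldl (fun v item => (idx.getD item []).foldl (fun v i => PySem.List.pySetD v i 1) v) vector

-- ===== PRECONDITION & SPEC =====
def Spec_vector_genre_item (lvr : List String) (dico_genre : List (String × Int)) (out : List Int) : Prop := out = vector_genre_item_alt lvr dico_genre
instance (lvr : List String) (dico_genre : List (String × Int)) (out : List Int) : Decidable (Spec_vector_genre_item lvr dico_genre out) := by unfold Spec_vector_genre_item; infer_instance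

-- ===== CLAIM (what is proved, stated in full; the proofs are below) =====
def Claim_equal_vector_genre_item : Prop := ∀ (lvr : List String) (dico_genre : List (String × Int)), Dom_vector_genre_item lvr dico_genre → Spec_vector_genre_item lvr dico_genre (vector_genre_item lvr dico_genre)

-- ===== LEMMAS AND PROOFS =====

-- B's index dict, named for the proofs (definitionally the idx of vector_genre_item_alt)
def pvIdx (dico_genre : List (String × Int)) : PySem.Dict String (List Int) :=
  (PySem.List.enumerate (dico_genre.map Prod.fst)).foldl
    (fun d p => d.modify p.2 [] (· ++ [p.1])) PySem.Dict.empty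

lemma pvIdx_getD (dg : List (String × Int)) (e : String) :
    (pvIdx dg).getD e [] =
      ((PySem.List.enumerate (dg.map Prod.fst)).filter (fun p => p.2 == e)).map (·.1) := by
  unfold pvIdx
  rw [show (fun (d : PySem.Dict String (List Int)) (p : Int × String) =>
        d.modify p.2 [] (· ++ [p.1])) =
      (fun d p => (fun (d : PySem.Dict String (List Int)) (q : String × Int) =>
        d.modify q.1 [] (· ++ [q.2])) d ((fun (p : Int × String) => (p.2, p.1)) p)) from rfl]
  rw [← List.foldl_map (f := fun p : Int × String => (p.2, p.1))
      (g := fun (d : PySem.Dict String (List Int)) (q : String × Int) => d.modify q.1 [] (· ++ [q.2]))]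
  rw [PySem.Dict.getD_foldl_modify_append]
  simp [List.filter_map, List.map_map, Function.comp_def]

lemma pvIdx_mem (dg : List (String × Int)) (e : String) (j : Int) :
    j ∈ (pvIdx dg).getD e [] ↔
      ∃ (k : Nat), ∃ (h : k < dg.length), j = (k : Int) ∧ (dg[k]).1 = e := by
  rw [pvIdx_getD]
  simp only [List.mem_map, List.mem_filter, PySem.List.mem_enumerate_iff]
  constructor
  · rintro ⟨p, ⟨⟨k, hk, rfl⟩, hbe⟩, rfl⟩
    simp only [List.length_map] at hk
    exact ⟨k, hk, by simp, by
      have := (beq_iff_eq.mp hbe); simpa [List.getElem_map] using this⟩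
  · rintro ⟨k, hk, rfl, hke⟩
    exact ⟨((k : Int), (dg.map Prod.fst)[k]'(by simpa using hk)),
      ⟨⟨k, by simpa using hk, by simp⟩, by simp [List.getElem_map, hke]⟩, rfl⟩

lemma pvIdx_nonneg (dg : List (String × Int)) (e : String) (j : Int)
    (h : j ∈ (pvIdx dg).getD e []) : 0 ≤ j := by
  rcases (pvIdx_mem dg e j).mp h with ⟨k, _, rfl, _⟩
  exact Int.natCast_nonneg k

lemma pvSetFold_length (is : List Int) (v : List Int) :
    (is.foldl (fun v i => PySem.List.pySetD v i 1) v).length = v.length := by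
  induction is generalizing v with
  | nil => rfl
  | cons i t ih => simp [ih, PySem.List.length_pySetD]

lemma pvSetFold_getElem? (is : List Int) (hpos : ∀ i ∈ is, 0 ≤ i) (v : List Int) (j : Nat) :
    (is.foldl (fun v i => PySem.List.pySetD v i 1) v)[j]? =
      if (j : Int) ∈ is ∧ j < v.length then some 1 else v[j]? := by
  induction is generalizing v with
  | nil => simp
  | cons i t ih =>
    have h0 : 0 ≤ i := hpos i (by simp)
    simp only [List.foldl_cons]
    rw [ih (fun x hx => hpos x (by simp [hx]))]
    rw [PySem.List.pySetD_of_nonneg v 1 h0]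
    by_cases hji : (j : Int) = i
    · have hjt : i.toNat = j := by omega
      by_cases hjlen : j < v.length
      · simp [List.length_set, hjt, hjlen, hji]
      · have : v[j]? = none := by
          rw [List.getElem?_eq_none_iff]; omega
        simp [List.length_set, hjt, hjlen, hji]
    · have hne : i.toNat ≠ j := by omega
      simp only [List.length_set, List.getElem?_set, hne, if_false]
      by_cases hmem : (j : Int) ∈ t
      · simp [hmem, hji]
      · simp [hmem, hji]

lemma pvOuter_getElem? (idx : PySem.Dict String (List Int))
    (hpos : ∀ e i, i ∈ idx.getD e [] → 0 ≤ i)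
    (lvr : List String) (v : List Int) (j : Nat) :
    (lvr.foldl (fun v item => (idx.getD item []).foldl (fun v i => PySem.List.pySetD v i 1) v) v)[j]? =
      if (∃ e ∈ lvr, (j : Int) ∈ idx.getD e []) ∧ j < v.length then some 1 else v[j]? := by
  induction lvr generalizing v with
  | nil => simp
  | cons e t ih =>
    simp only [List.foldl_cons]
    rw [ih]
    rw [pvSetFold_length, pvSetFold_getElem? _ (fun i hi => hpos e i hi)]
    by_cases he : (j : Int) ∈ idx.getD e [] <;>
    by_cases ht : ∃ e' ∈ t, (j : Int) ∈ idx.getD e' [] <;>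
    by_cases hl : j < v.length <;>
      simp [he, ht, hl]

lemma pvA_eq_map (lvr : List String) (dg : List (String × Int)) :
    vector_genre_item lvr dg =
      dg.map (fun p => if lvr.contains p.1 then (1 : Int) else 0) := by
  unfold vector_genre_item
  rw [show (fun (vector : List Int) (p : String × Int) =>
        if lvr.contains p.1 then vector ++ [1] else vector ++ [0]) =
      (fun vector p => vector ++ [if lvr.contains p.1 then (1 : Int) else 0]) from by
    funext v p; split <;> rfl]
  rw [PySem.List.foldl_append_singleton_eq_map]
  simp

lemma pvMain (lvr : List String) (dg : List (String × Int)) :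
    vector_genre_item lvr dg = vector_genre_item_alt lvr dg := by
  have halt : vector_genre_item_alt lvr dg =
      lvr.foldl (fun v item => ((pvIdx dg).getD item []).foldl
        (fun v i => PySem.List.pySetD v i 1) v) (List.replicate dg.length 0) := rfl
  rw [pvA_eq_map, halt]
  apply List.ext_getElem?
  intro j
  rw [pvOuter_getElem? (pvIdx dg) (fun e i => pvIdx_nonneg dg e i) lvr _ j]
  by_cases hj : j < dg.length
  · have hcond : (∃ e ∈ lvr, (j : Int) ∈ (pvIdx dg).getD e []) ↔ (dg[j]).1 ∈ lvr := by
      constructor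
      · rintro ⟨e, hel, hmem⟩
        rcases (pvIdx_mem dg e _).mp hmem with ⟨k, hk, hjk, hke⟩
        have : k = j := by omega
        subst this; subst hke; exact hel
      · intro h
        exact ⟨(dg[j]).1, h, (pvIdx_mem dg _ _).mpr ⟨j, hj, rfl, rfl⟩⟩
    by_cases hc : (dg[j]).1 ∈ lvr
    · simp [hcond, hc, hj]
    · have hcb : lvr.contains (dg[j]).1 = false := by
        simp [hc]
      simp [hcond, hc, hj]
  · have h1 : (dg.map (fun p => if lvr.contains p.1 then (1 : Int) else 0))[j]? = none := by
      rw [List.getElem?_eq_none_iff]; simpa using Nat.le_of_not_lt hj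
    have h2 : (List.replicate dg.length (0 : Int))[j]? = none := by
      rw [List.getElem?_eq_none_iff]; simpa using Nat.le_of_not_lt hj
    simp [hj]

-- ===== VERDICT (by name: the statement is the Claim_ definition above) =====
theorem vector_genre_item_spec : Claim_equal_vector_genre_item := by
  intro lvr dg _
  unfold Spec_vector_genre_item
  exact pvMain lvr dg
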